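-- pv_equiv track=rewrite | github.com/phillipus85/Py-Ideas | Concepts/cypher/new_test.py | vigenere_decrypt_colstream_rows
-- ===== SOURCE A (Python) =====
-- ALPHABET = "ABCDEFGHIJKLMNOPQRSTUVWXYZ"
--
-- char_to_idx = {c: i for i, c in enumerate(ALPHABET)}
--
-- def vigenere_decrypt_stream(ciphertext: str, key: str) -> str:
--     key_idx = [char_to_idx[k] for k in key.upper()]
--     out = []
--     ki = 0
--     for ch in ciphertext.upper():
--         if ch in char_to_idx:
--             cidx = char_to_idx[ch]
--             pidx = (cidx - key_idx[ki % len(key_idx)]) % 26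
--             out.append(ALPHABET[pidx])
--             ki += 1
--         else:
--             out.append(ch)
--     return ''.join(out)
--
-- def vigenere_decrypt_colstream_rows(rows, key):
--     # read columns top->bottom left->right into stream, decrypt the stream,
--     # then reconstruct rows by reading across the reconstructed columns.
--     nrows = len(rows)
--     ncols = len(rows[0])
--     stream = ''.join(rows[r][c] for c in range(ncols) for r in range(nrows))
--     dec = vigenere_decrypt_stream(stream, key)
--     # split dec into columns of length nrows, then rebuild rows
--     cols = [dec[i*nrows:(i+1)*nrows] for i in range(ncols)]
--     rows_out = [''.join(cols[c][r] for c in range(ncols))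
--                 for r in range(nrows)]
--     return rows_out
-- ===== SOURCE B (Python) =====
-- ALPHABET = "ABCDEFGHIJKLMNOPQRSTUVWXYZ"
--
-- def vigenere_decrypt_colstream_rows(rows, key):
--     # One column-major pass filling a row-major grid in place: no intermediate
--     # flat stream string and no slicing back into columns afterwards.
--     key_idx = [ord(k) - 65 for k in key.upper()]
--     nrows = len(rows)
--     ncols = len(rows[0])
--     grid = [[None] * ncols for _ in range(nrows)]
--     ki = 0
--     for c in range(ncols):
--         for r in range(nrows):
--             ch = rows[r][c].upper()
--             if 'A' <= ch <= 'Z':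
--                 grid[r][c] = ALPHABET[(ord(ch) - 65 - key_idx[ki % len(key_idx)]) % 26]
--                 ki += 1
--             else:
--                 grid[r][c] = ch
--     return [''.join(row) for row in grid]
-- ===== Notes on version B (the rewrite author's own statement) =====
-- stated objective: alternative
-- what changed: B replaces A's three-phase pipeline (flatten the grid column-major into a stream string, decrypt the stream, slice it back into columns and re-join rows) by a single column-major double loop that decrypts each cell in place into a row-major grid, so no intermediate stream string and no slicing/reconstruction pass exist.
import Mathlib
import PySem

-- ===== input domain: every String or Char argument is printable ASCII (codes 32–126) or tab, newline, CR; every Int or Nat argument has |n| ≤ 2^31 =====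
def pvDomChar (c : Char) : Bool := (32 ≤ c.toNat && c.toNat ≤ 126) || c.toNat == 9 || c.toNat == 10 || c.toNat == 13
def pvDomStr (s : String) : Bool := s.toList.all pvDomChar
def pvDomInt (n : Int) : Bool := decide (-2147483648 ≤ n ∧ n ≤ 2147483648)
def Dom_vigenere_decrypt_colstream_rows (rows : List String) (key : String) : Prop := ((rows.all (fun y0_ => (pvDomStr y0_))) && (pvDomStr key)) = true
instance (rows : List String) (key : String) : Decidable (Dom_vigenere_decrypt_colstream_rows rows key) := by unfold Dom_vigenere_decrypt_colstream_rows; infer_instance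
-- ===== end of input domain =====

-- B replaces A's flat-stream + slice-back reconstruction by a single column-major
-- pass that fills a row-major grid in place (alternative decomposition, same cost).


-- ===== PORT A =====
def pvALPHABET : List Char := "ABCDEFGHIJKLMNOPQRSTUVWXYZ".toList

-- char_to_idx = {c: i for i, c in enumerate(ALPHABET)}
def pvCharToIdx : PySem.Dict Char Int :=
  PySem.Dict.ofList ((PySem.List.enumerate pvALPHABET 0).map (fun p => (p.2, p.1)))

-- vigenere_decrypt_stream; returns the joined chars as a List Char
-- (the KeyError of char_to_idx[k] on a non-letter key char is outside Pre_; getD's default is never read there inside Pre_)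
def vigenere_decrypt_stream (ciphertext : String) (key : String) : List Char :=
  let key_idx : List Int := (PySem.Str.upper key).toList.map (fun k => pvCharToIdx.getD k 0)
  let res := (PySem.Str.upper ciphertext).toList.foldl
    (fun (st : List Char × Int) ch =>
      if pvCharToIdx.contains ch then
        let cidx := pvCharToIdx.getD ch 0
        let pidx := PySem.Int.mod (cidx - PySem.List.pyGetD key_idx (PySem.Int.mod st.2 (PySem.List.len key_idx)) 0) 26
        (st.1 ++ [PySem.List.pyGetD pvALPHABET pidx '?'], st.2 + 1)
      else (st.1 ++ [ch], st.2))
    ([], 0)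
  res.1

def vigenere_decrypt_colstream_rows (rows : List String) (key : String) : List String :=
  let nrows : Int := PySem.List.len rows
  let ncols : Int := PySem.Str.len (PySem.List.pyGetD rows 0 "")   -- rows[0] (IndexError on [] is outside Pre_)
  let stream : List Char :=
    ((PySem.List.pyRange 0 ncols 1).map (fun c =>
      (PySem.List.pyRange 0 nrows 1).map (fun r =>
        PySem.List.pyGetD (PySem.List.pyGetD rows r "").toList c ' '))).flatten
  let dec : List Char := vigenere_decrypt_stream (String.ofList stream) key
  let cols : List (List Char) := (PySem.List.pyRange 0 ncols 1).map (fun i =>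
    PySem.List.slice dec (some (i * nrows)) (some ((i + 1) * nrows)))
  (PySem.List.pyRange 0 nrows 1).map (fun r =>
    String.ofList ((PySem.List.pyRange 0 ncols 1).map (fun c =>
      PySem.List.pyGetD (PySem.List.pyGetD cols c []) r ' ')))

-- ===== PORT B =====
def vigenere_decrypt_colstream_rows_alt (rows : List String) (key : String) : List String :=
  let key_idx : List Int := (PySem.Str.upper key).toList.map (fun k => ((k.toNat : Int) - 65))
  let nrows : Int := PySem.List.len rows
  let ncols : Int := PySem.Str.len (PySem.List.pyGetD rows 0 "")
  -- grid = [[None] * ncols for _ in range(nrows)]  (placeholder ' ' stands for None; every cell is overwritten)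
  let grid0 : List (List Char) := (PySem.List.pyRange 0 nrows 1).map (fun _ => List.replicate ncols.toNat ' ')
  let res := (PySem.List.pyRange 0 ncols 1).foldl (fun st0 c =>
      (PySem.List.pyRange 0 nrows 1).foldl (fun (st : List (List Char) × Int) r =>
        let ch := PySem.Chars.upperChar (PySem.List.pyGetD (PySem.List.pyGetD rows r "").toList c ' ')
        if 'A' ≤ ch ∧ ch ≤ 'Z' then
          let v := PySem.List.pyGetD pvALPHABET
            (PySem.Int.mod (((ch.toNat : Int) - 65) - PySem.List.pyGetD key_idx (PySem.Int.mod st.2 (PySem.List.len key_idx)) 0) 26) '?'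
          (PySem.List.pySetD st.1 r (PySem.List.pySetD (PySem.List.pyGetD st.1 r []) c v), st.2 + 1)
        else
          (PySem.List.pySetD st.1 r (PySem.List.pySetD (PySem.List.pyGetD st.1 r []) c ch), st.2)) st0)
    (grid0, (0 : Int))
  res.1.map (fun row => String.ofList row)

-- ===== PRECONDITION & SPEC =====
def pvIsLetterB (c : Char) : Bool := ('A' ≤ c && c ≤ 'Z') || ('a' ≤ c && c ≤ 'z')


-- Pre_ is exactly where the Python A returns (on Dom): rows non-empty (else IndexError on rows[0]),
-- every row at least as long as rows[0] (else IndexError on rows[r][c]), every key char an ASCII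
-- letter (else KeyError in char_to_idx), and an empty key only when no letter is scanned
-- (else ZeroDivisionError on ki % 0).
def Pre_vigenere_decrypt_colstream_rows (rows : List String) (key : String) : Prop :=
  rows ≠ [] ∧
  (rows.all (fun s => decide ((rows.head?.getD "").toList.length ≤ s.toList.length)) = true) ∧
  (key.toList.all pvIsLetterB = true) ∧
  (key ≠ "" ∨ rows.all (fun s => (s.toList.take (rows.head?.getD "").toList.length).all (fun c => !pvIsLetterB c)) = true)

instance (rows : List String) (key : String) : Decidable (Pre_vigenere_decrypt_colstream_rows rows key) := by
  unfold Pre_vigenere_decrypt_colstream_rows; infer_instance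

def pvWitness_vigenere_decrypt_colstream_rows : List String × String := (["AB", "CD"], "k")

def Spec_vigenere_decrypt_colstream_rows (rows : List String) (key : String) (out : List String) : Prop := out = vigenere_decrypt_colstream_rows_alt rows key
instance (rows : List String) (key : String) (out : List String) : Decidable (Spec_vigenere_decrypt_colstream_rows rows key out) := by unfold Spec_vigenere_decrypt_colstream_rows; infer_instance

-- ===== CLAIM (what is proved, stated in full; the proofs are below) =====
def Claim_equal_vigenere_decrypt_colstream_rows : Prop := ∀ (rows : List String) (key : String), Dom_vigenere_decrypt_colstream_rows rows key → Pre_vigenere_decrypt_colstream_rows rows key → Spec_vigenere_decrypt_colstream_rows rows key (vigenere_decrypt_colstream_rows rows key)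

-- ===== LEMMAS AND PROOFS =====

-- the common per-character step (B's shape): uppercase, decrypt a letter advancing ki, pass anything else through
def pvStep (K : List Int) (ki : Int) (c : Char) : Char × Int :=
  let u := PySem.Chars.upperChar c
  if 'A' ≤ u ∧ u ≤ 'Z' then
    (PySem.List.pyGetD pvALPHABET
      (PySem.Int.mod (((u.toNat : Int) - 65) - PySem.List.pyGetD K (PySem.Int.mod ki ((K.length : Int))) 0) 26) '?', ki + 1)
  else (u, ki)

-- mapAccum of pvStep over a char list
def pvMA (K : List Int) (ki : Int) : List Char → List Char × Int
  | [] => ([], ki)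
  | c :: t =>
    let p := pvStep K ki c
    let q := pvMA K p.2 t
    (p.1 :: q.1, q.2)

-- pvMA threaded over a list of columns
def pvDC (K : List Int) (ki : Int) : List (List Char) → List (List Char) × Int
  | [] => ([], ki)
  | col :: t =>
    let p := pvMA K ki col
    let q := pvDC K p.2 t
    (p.1 :: q.1, q.2)

lemma pvCharFacts (c : Char) (h : pvDomChar c = true) :
    (pvCharToIdx.contains (PySem.Chars.upperChar c)
        = decide ('A' ≤ PySem.Chars.upperChar c ∧ PySem.Chars.upperChar c ≤ 'Z'))
  ∧ (('A' ≤ PySem.Chars.upperChar c ∧ PySem.Chars.upperChar c ≤ 'Z') →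
        pvCharToIdx.getD (PySem.Chars.upperChar c) 0 = ((PySem.Chars.upperChar c).toNat : Int) - 65)
  ∧ (pvIsLetterB c = true → ('A' ≤ PySem.Chars.upperChar c ∧ PySem.Chars.upperChar c ≤ 'Z')) := by
  have hb : 9 ≤ c.toNat ∧ c.toNat ≤ 126 := by
    simp [pvDomChar] at h; omega
  obtain ⟨n, h1, h2, rfl⟩ : ∃ n, 9 ≤ n ∧ n ≤ 126 ∧ c = Char.ofNat n :=
    ⟨c.toNat, hb.1, hb.2, (Char.ofNat_toNat c).symm⟩
  interval_cases n <;> decide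

-- ---- basic machinery lemmas ----
lemma pvMA_append (K : List Int) (ki : Int) (l₁ l₂ : List Char) :
    pvMA K ki (l₁ ++ l₂) =
      ((pvMA K ki l₁).1 ++ (pvMA K (pvMA K ki l₁).2 l₂).1, (pvMA K (pvMA K ki l₁).2 l₂).2) := by
  induction l₁ generalizing ki with
  | nil => simp [pvMA]
  | cons c t ih => simp [pvMA, ih]

lemma pvMA_length (K : List Int) (ki : Int) (l : List Char) : (pvMA K ki l).1.length = l.length := by
  induction l generalizing ki with
  | nil => simp [pvMA]
  | cons c t ih => simp [pvMA, ih]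

lemma pvDC_append (K : List Int) (ki : Int) (L : List (List Char)) (x : List Char) :
    pvDC K ki (L ++ [x]) =
      ((pvDC K ki L).1 ++ [(pvMA K (pvDC K ki L).2 x).1], (pvMA K (pvDC K ki L).2 x).2) := by
  induction L generalizing ki with
  | nil => simp [pvDC]
  | cons c t ih => simp [pvDC, ih]

lemma pvDC_length (K : List Int) (ki : Int) (L : List (List Char)) : (pvDC K ki L).1.length = L.length := by
  induction L generalizing ki with
  | nil => simp [pvDC]
  | cons c t ih => simp [pvDC, ih]

lemma pvMA_flatten (K : List Int) (ki : Int) (L : List (List Char)) :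
    pvMA K ki L.flatten = ((pvDC K ki L).1.flatten, (pvDC K ki L).2) := by
  induction L generalizing ki with
  | nil => simp [pvMA, pvDC]
  | cons c t ih => simp [pvDC, pvMA_append, ih]

lemma pvDC_len_mem (K : List Int) (ki : Int) (L : List (List Char)) (n : Nat)
    (h : ∀ y ∈ L, y.length = n) : ∀ x ∈ (pvDC K ki L).1, x.length = n := by
  induction L generalizing ki with
  | nil => simp [pvDC]
  | cons c t ih =>
    intro x hx
    simp [pvDC] at hx
    rcases hx with rfl | hx
    · simp [pvMA_length]; exact h c (by simp)
    · exact ih _ (fun y hy => h y (by simp [hy])) x hx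

lemma pvFlatten_drop_take {α : Type} (L : List (List α)) (n : Nat)
    (h : ∀ x ∈ L, x.length = n) (i : Nat) (hi : i < L.length) :
    (L.flatten.drop (i * n)).take n = L[i] := by
  induction L generalizing i with
  | nil => simp at hi
  | cons c t ih =>
    cases i with
    | zero =>
      have hc : c.length = n := h c (by simp)
      simp [hc]
    | succ j =>
      have hc : c.length = n := h c (by simp)
      have he : (j + 1) * n = c.length + j * n := by rw [hc]; ring
      rw [List.flatten_cons, he]
      rw [show (c ++ t.flatten).drop (c.length + j * n) = t.flatten.drop (j * n) by simp [List.drop_append]]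
      have := ih (fun y hy => h y (by simp [hy])) j (by simpa using hi)
      simpa using this

-- ---- canonical intermediate forms ----
def pvK (key : String) : List Int := (PySem.Str.upper key).toList.map (fun k => ((k.toNat : Int) - 65))

def pvColsF (cell : Nat → Nat → Char) (N C : Nat) : List (List Char) :=
  (List.range C).map (fun c => (List.range N).map (fun r => cell r c))

def pvOutF (K : List Int) (cell : Nat → Nat → Char) (N C : Nat) : List String :=
  (List.range N).map (fun r => String.ofList ((List.range C).map (fun c =>
    (((pvDC K 0 (pvColsF cell N C)).1).getD c []).getD r ' ')))

lemma pvCell_dom (rows : List String) (r c : Nat) (h : rows.all pvDomStr = true) :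
    pvDomChar (PySem.List.pyGetD (PySem.List.pyGetD rows (r : Int) "").toList (c : Int) ' ') = true := by
  simp only [PySem.List.pyGetD_natCast]
  by_cases hr : r < rows.length
  · have hm : rows.getD r "" ∈ rows := by
      rw [List.getD_eq_getElem rows "" hr]; exact List.getElem_mem hr
    have hs : pvDomStr (rows.getD r "") = true := by
      rw [List.all_eq_true] at h; exact h _ hm
    by_cases hc : c < (rows.getD r "").toList.length
    · rw [List.getD_eq_getElem _ ' ' hc]
      rw [pvDomStr, List.all_eq_true] at hs
      exact hs _ (List.getElem_mem hc)
    · rw [List.getD_eq_default _ ' ' (by omega)]; decide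
  · rw [List.getD_eq_default _ "" (by omega)]
    simp; decide

lemma pvColsF_dom (rows : List String) (h : rows.all pvDomStr = true) (N C : Nat) :
    ∀ x ∈ ((List.range C).map (fun (c : Nat) => (List.range N).map (fun (r : Nat) =>
        PySem.List.pyGetD (PySem.List.pyGetD rows (r : Int) "").toList (c : Int) ' '))).flatten,
      pvDomChar x = true := by
  intro x hx
  rw [List.mem_flatten] at hx
  obtain ⟨l, hl, hxl⟩ := hx
  rw [List.mem_map] at hl
  obtain ⟨c, _, rfl⟩ := hl
  rw [List.mem_map] at hxl
  obtain ⟨r, _, rfl⟩ := hxl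
  exact pvCell_dom rows r c h

lemma pvUpper_ofList (l : List Char) :
    (PySem.Str.upper (String.ofList l)).toList = l.map PySem.Chars.upperChar := by
  rw [PySem.Str.toList_upper]
  have : (String.ofList l).toList = l := by simp
  rw [this]
  rfl

lemma pvSliceRebuild (K : List Int) (L : List (List Char)) (N : Nat) (c : Nat)
    (hL : ∀ x ∈ L, x.length = N) (hc : c < L.length) :
    PySem.List.slice ((pvMA K 0 L.flatten).1) (some ((c : Int) * (N : Int))) (some (((c : Int) + 1) * (N : Int)))
      = ((pvDC K 0 L).1).getD c [] := by
  rw [pvMA_flatten]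
  rw [show ((c : Int) * (N : Int)) = ((c * N : Nat) : Int) by push_cast; ring]
  rw [show (((c : Int) + 1) * (N : Int)) = (((c + 1) * N : Nat) : Int) by push_cast; ring]
  rw [PySem.List.slice_natCast]
  rw [show (c + 1) * N - c * N = N by rw [Nat.succ_mul]; omega]
  have hlen : c < (pvDC K 0 L).1.length := by rw [pvDC_length]; exact hc
  rw [List.getD_eq_getElem _ [] hlen]
  exact pvFlatten_drop_take _ _ (pvDC_len_mem K 0 L N hL) c hlen

lemma pvFoldA (K : List Int) (l : List Char) (hdom : ∀ c ∈ l, pvDomChar c = true) (acc : List Char) (ki : Int) :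
    (l.map PySem.Chars.upperChar).foldl
      (fun (st : List Char × Int) ch =>
        if pvCharToIdx.contains ch then
          (st.1 ++ [PySem.List.pyGetD pvALPHABET
            (PySem.Int.mod ((pvCharToIdx.getD ch 0) - PySem.List.pyGetD K (PySem.Int.mod st.2 ((K.length : Int))) 0) 26) '?'], st.2 + 1)
        else (st.1 ++ [ch], st.2)) (acc, ki)
    = (acc ++ (pvMA K ki l).1, (pvMA K ki l).2) := by
  induction l generalizing acc ki with
  | nil => simp [pvMA]
  | cons c t ih =>
    obtain ⟨f1, f2, f3⟩ := pvCharFacts c (hdom c (by simp))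
    have iht := ih (fun x hx => hdom x (by simp [hx]))
    by_cases hL : ('A' ≤ PySem.Chars.upperChar c ∧ PySem.Chars.upperChar c ≤ 'Z')
    · simp only [List.map_cons, List.foldl_cons, f1, hL, f2 hL]
      rw [iht]
      simp [pvMA, pvStep, hL, List.append_assoc]
    · simp only [List.map_cons, List.foldl_cons, f1, hL, decide_false]
      rw [iht]
      simp [pvMA, pvStep, hL, List.append_assoc]

lemma pvKA_eq (rows : List String) (key : String) (hdom : Dom_vigenere_decrypt_colstream_rows rows key)
    (hkey : ∀ k ∈ key.toList, pvIsLetterB k = true) :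
    (PySem.Str.upper key).toList.map (fun k => pvCharToIdx.getD k 0) = pvK key := by
  unfold pvK
  rw [PySem.Str.toList_upper]
  show (key.toList.map PySem.Chars.upperChar).map _ = (key.toList.map PySem.Chars.upperChar).map _
  simp only [List.map_map]
  apply List.map_congr_left
  intro k hk
  have hdk : pvDomChar k = true := by
    unfold Dom_vigenere_decrypt_colstream_rows at hdom
    simp only [Bool.and_eq_true] at hdom
    have := hdom.2
    rw [pvDomStr, List.all_eq_true] at this
    exact this _ hk
  obtain ⟨f1, f2, f3⟩ := pvCharFacts k hdk
  simp only [Function.comp_apply]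
  exact f2 (f3 (hkey k hk))

lemma pvA_eq (rows : List String) (key : String) (hdom : Dom_vigenere_decrypt_colstream_rows rows key)
    (hkey : ∀ k ∈ key.toList, pvIsLetterB k = true) :
    vigenere_decrypt_colstream_rows rows key
      = pvOutF (pvK key) (fun r c => PySem.List.pyGetD (PySem.List.pyGetD rows (r : Int) "").toList (c : Int) ' ')
          rows.length ((rows.getD 0 "").toList.length) := by
  have hrows : rows.all pvDomStr = true := by
    unfold Dom_vigenere_decrypt_colstream_rows at hdom
    simp only [Bool.and_eq_true] at hdom
    exact hdom.1
  simp only [vigenere_decrypt_colstream_rows, vigenere_decrypt_stream,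
    PySem.List.pyGetD_zero, PySem.Str.len_eq, PySem.List.len_eq]
  rw [pvKA_eq rows key hdom hkey]
  simp only [PySem.List.pyRange_zero_natCast, List.map_map, Function.comp_def]
  rw [pvUpper_ofList, pvFoldA (K := pvK key)]
  · simp only [List.nil_append]
    unfold pvOutF pvColsF
    apply List.map_congr_left
    intro r _
    congr 1
    apply List.map_congr_left
    intro c hc
    rw [List.mem_range] at hc
    simp only [PySem.List.pyGetD_natCast]
    rw [PySem.List.getD_map_range _ _ _ _ hc]
    rw [pvSliceRebuild (K := pvK key) (N := rows.length)]
    · intro x hx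
      rw [List.mem_map] at hx
      obtain ⟨y, _, rfl⟩ := hx
      simp
    · simpa using hc
  · exact pvColsF_dom rows hrows _ _


lemma pvSetD_natCast {α : Type} (xs : List α) (n : Nat) (v : α) (h : n < xs.length) :
    PySem.List.pySetD xs (n : Int) v = xs.set n v := by
  simp [PySem.List.pySetD, PySem.List.pySet?_natCast xs n v h]

lemma pvInner (K : List Int) (cell : Nat → Nat → Char) (c : Nat) (n : Nat) :
    ∀ (G : List (List Char)) (ki : Int), n ≤ G.length →
    (List.range n).foldl
      (fun (x : List (List Char) × Int) (r : Nat) =>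
        if 'A' ≤ PySem.Chars.upperChar (cell r c) ∧ PySem.Chars.upperChar (cell r c) ≤ 'Z' then
          (PySem.List.pySetD x.1 (r : Int)
              (PySem.List.pySetD (PySem.List.pyGetD x.1 (r : Int) []) (c : Int)
                (PySem.List.pyGetD pvALPHABET
                  (PySem.Int.mod ((((PySem.Chars.upperChar (cell r c)).toNat : Int) - 65) -
                      PySem.List.pyGetD K (PySem.Int.mod x.2 ((K.length : Int))) 0) 26) '?')),
            x.2 + 1)
        else
          (PySem.List.pySetD x.1 (r : Int)
              (PySem.List.pySetD (PySem.List.pyGetD x.1 (r : Int) []) (c : Int)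
                (PySem.Chars.upperChar (cell r c))),
            x.2)) (G, ki)
    = (G.mapIdx (fun r row => if r < n then
          PySem.List.pySetD row (c : Int) ((pvMA K ki ((List.range n).map (fun r => cell r c))).1.getD r ' ') else row),
       (pvMA K ki ((List.range n).map (fun r => cell r c))).2) := by
  induction n with
  | zero =>
    intro G ki _
    simp only [List.range_zero, List.foldl_nil, List.map_nil, pvMA]
    refine Prod.ext ?_ rfl
    apply List.ext_getElem (by simp)
    intro i h1 h2
    simp [List.getElem_mapIdx]
  | succ m ih =>
    intro G ki hm
    have hmG : m < G.length := by omega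
    rw [List.range_succ, List.foldl_append, ih G ki (by omega), List.foldl_cons, List.foldl_nil]
    have hMlen : (pvMA K ki ((List.range m).map (fun r => cell r c))).1.length = m := by
      rw [pvMA_length]; simp
    have hmap : ∀ v : Char,
        (G.mapIdx (fun r row => if r < m then
            PySem.List.pySetD row (c : Int) ((pvMA K ki ((List.range m).map (fun r => cell r c))).1.getD r ' ') else row)).set m
          (PySem.List.pySetD G[m] (c : Int) v)
        = G.mapIdx (fun r row => if r < m + 1 then
            PySem.List.pySetD row (c : Int)
              (((pvMA K ki ((List.range m).map (fun r => cell r c))).1 ++ [v]).getD r ' ') else row) := by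
      intro v
      apply List.ext_getElem (by simp)
      intro i hi1 hi2
      rw [List.getElem_set]
      by_cases him : m = i
      · subst him
        rw [if_pos rfl]
        rw [List.getElem_mapIdx]
        rw [if_pos (by omega)]
        congr 1
        rw [List.getD_append_right _ _ _ _ (by omega)]
        simp [hMlen]
      · rw [if_neg him, List.getElem_mapIdx, List.getElem_mapIdx]
        have hiG : i < G.length := by simpa using hi1
        by_cases hlt : i < m
        · rw [if_pos hlt, if_pos (by omega)]
          congr 1
          exact (List.getD_append _ _ _ _ (by omega)).symm
        · rw [if_neg hlt, if_neg (by omega)]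
    have hget : PySem.List.pyGetD
        (G.mapIdx (fun r row => if r < m then
          PySem.List.pySetD row (c : Int) ((pvMA K ki ((List.range m).map (fun r => cell r c))).1.getD r ' ') else row))
        (m : Int) [] = G[m] := by
      rw [PySem.List.pyGetD_natCast]
      rw [List.getD_eq_getElem _ _ (by simpa using hmG)]
      rw [List.getElem_mapIdx]
      rw [if_neg (by omega)]
    have hset : ∀ X : List Char, PySem.List.pySetD
        (G.mapIdx (fun r row => if r < m then
          PySem.List.pySetD row (c : Int) ((pvMA K ki ((List.range m).map (fun r => cell r c))).1.getD r ' ') else row))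
        (m : Int) X
        = (G.mapIdx (fun r row => if r < m then
          PySem.List.pySetD row (c : Int) ((pvMA K ki ((List.range m).map (fun r => cell r c))).1.getD r ' ') else row)).set m X := by
      intro X
      exact pvSetD_natCast _ m X (by simpa using hmG)
    simp only [List.map_append, List.map_cons, List.map_nil]
    rw [pvMA_append]
    by_cases hL : ('A' ≤ PySem.Chars.upperChar (cell m c) ∧ PySem.Chars.upperChar (cell m c) ≤ 'Z')
    · rw [if_pos hL]
      refine Prod.ext ?_ ?_
      · show PySem.List.pySetD _ (m : Int) _ = _
        rw [hget, hset, hmap]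
        congr 2
        simp [pvMA, pvStep, hL]
      · show _ + 1 = _
        simp [pvMA, pvStep, hL]
    · rw [if_neg hL]
      refine Prod.ext ?_ ?_
      · show PySem.List.pySetD _ (m : Int) _ = _
        rw [hget, hset, hmap]
        congr 2
        simp [pvMA, pvStep, hL]
      · show _ = _
        simp [pvMA, pvStep, hL]

lemma pvOuter (K : List Int) (cell : Nat → Nat → Char) (N C : Nat) :
    ∀ (j : Nat), j ≤ C →
    (List.range j).foldl
      (fun (x : List (List Char) × Int) (c : Nat) =>
        (List.range N).foldl
          (fun (x : List (List Char) × Int) (r : Nat) =>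
            if 'A' ≤ PySem.Chars.upperChar (cell r c) ∧ PySem.Chars.upperChar (cell r c) ≤ 'Z' then
              (PySem.List.pySetD x.1 (r : Int)
                  (PySem.List.pySetD (PySem.List.pyGetD x.1 (r : Int) []) (c : Int)
                    (PySem.List.pyGetD pvALPHABET
                      (PySem.Int.mod ((((PySem.Chars.upperChar (cell r c)).toNat : Int) - 65) -
                          PySem.List.pyGetD K (PySem.Int.mod x.2 ((K.length : Int))) 0) 26) '?')),
                x.2 + 1)
            else
              (PySem.List.pySetD x.1 (r : Int)
                  (PySem.List.pySetD (PySem.List.pyGetD x.1 (r : Int) []) (c : Int)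
                    (PySem.Chars.upperChar (cell r c))),
                x.2)) x)
      ((List.range N).map (fun _ => List.replicate C ' '), 0)
    = ((List.range N).map (fun r => (List.range C).map (fun c => if c < j then
          (((pvDC K 0 ((pvColsF cell N C).take j)).1).getD c []).getD r ' ' else ' ')),
       (pvDC K 0 ((pvColsF cell N C).take j)).2) := by
  intro j
  induction j with
  | zero =>
    intro _
    simp only [List.range_zero, List.foldl_nil, List.take_zero, pvDC]
    refine Prod.ext ?_ rfl
    apply List.map_congr_left
    intro r _
    simp [List.map_const']
  | succ j ih =>
    intro hj
    have hjC : j < C := by omega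
    rw [List.range_succ, List.foldl_append, ih (by omega), List.foldl_cons, List.foldl_nil]
    rw [pvInner K cell j N _ _ (by simp)]
    have hcolsj : (pvColsF cell N C)[j]'(by simp [pvColsF]; omega) = (List.range N).map (fun r => cell r j) := by
      simp [pvColsF]
    have htake : (pvColsF cell N C).take (j+1)
        = (pvColsF cell N C).take j ++ [(List.range N).map (fun r => cell r j)] := by
      rw [← List.take_concat_get' _ j (by simp [pvColsF]; omega)]
      rw [hcolsj]
    rw [htake, pvDC_append]
    dsimp only
    refine Prod.ext ?_ rfl
    apply List.ext_getElem (by simp)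
    intro i hi1 hi2
    have hiN : i < N := by simpa using hi1
    rw [List.getElem_mapIdx]
    simp only [List.getElem_map, List.getElem_range]
    rw [if_pos hiN]
    rw [pvSetD_natCast _ j _ (by simp [hjC])]
    apply List.ext_getElem (by simp)
    intro p hp1 hp2
    have hpC : p < C := by simpa using hp1
    rw [List.getElem_set]
    simp only [List.getElem_map, List.getElem_range]
    have hDlen : (pvDC K 0 ((pvColsF cell N C).take j)).1.length = j := by
      rw [pvDC_length, List.length_take]
      simp [pvColsF]; omega
    by_cases hpj : j = p
    · subst hpj
      rw [if_pos rfl, if_pos (by omega)]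
      rw [List.getD_append_right _ _ _ _ (by omega)]
      rw [hDlen]
      simp
    · rw [if_neg hpj]
      by_cases hplt : p < j
      · rw [if_pos hplt, if_pos (by omega)]
        rw [List.getD_append _ _ _ _ (by omega)]
      · rw [if_neg hplt, if_neg (by omega)]

lemma pvB_eq (rows : List String) (key : String) :
    vigenere_decrypt_colstream_rows_alt rows key
      = pvOutF (pvK key) (fun r c => PySem.List.pyGetD (PySem.List.pyGetD rows (r : Int) "").toList (c : Int) ' ')
          rows.length ((rows.getD 0 "").toList.length) := by
  simp only [vigenere_decrypt_colstream_rows_alt,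
    PySem.List.pyGetD_zero, PySem.Str.len_eq, PySem.List.len_eq,
    PySem.List.pyRange_zero_natCast, List.foldl_map, List.map_map, Function.comp_def, Int.toNat_natCast]
  rw [show (PySem.Str.upper key).toList.map (fun k => ((k.toNat : Int) - 65)) = pvK key from rfl]
  rw [pvOuter (pvK key) (fun r c => PySem.List.pyGetD (PySem.List.pyGetD rows (r : Int) "").toList (c : Int) ' ')
      rows.length ((rows.getD 0 "").toList.length) ((rows.getD 0 "").toList.length) (le_refl _)]
  dsimp only
  rw [List.take_of_length_le (by simp [pvColsF])]
  unfold pvOutF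
  rw [List.map_map]
  apply List.map_congr_left
  intro r _
  dsimp only [Function.comp]
  congr 1
  apply List.map_congr_left
  intro c hc
  rw [if_pos (List.mem_range.mp hc)]

-- ===== VERDICT (by name: the statement is the Claim_ definition above) =====
theorem vigenere_decrypt_colstream_rows_spec : Claim_equal_vigenere_decrypt_colstream_rows := by
  intro rows key hdom hpre
  unfold Spec_vigenere_decrypt_colstream_rows
  have hkey : ∀ k ∈ key.toList, pvIsLetterB k = true := by
    intro k hk
    have h := hpre.2.2.1
    rw [List.all_eq_true] at h
    exact h k hk
  rw [pvA_eq rows key hdom hkey, pvB_eq]
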